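-- pv_equiv track=rewrite | github.com/mohamedadly1/CipherX | row.py | encrypt_row_transposition
-- ===== SOURCE A (Python) =====
-- def encrypt_row_transposition(plain_text, key):
--     plain_text = plain_text.replace(" ", "").upper()
--
--     key = [int(num) for num in key]
--
--     num_columns = len(key)
--
--     num_rows = -(-len(plain_text) // num_columns)
--
--     columns = [''] * num_columns
--
--
--     for i, char in enumerate(plain_text):
--         columns[key[i % num_columns] - 1] += char
--
--     cipher_text = ''.join(columns)
--
--     return cipher_text
-- ===== SOURCE B (Python) =====
-- def encrypt_row_transposition(plain_text, key):
--     text = plain_text.replace(" ", "").upper()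
--     num_columns = len(key)
--     pairs = [(key[i % num_columns], ch) for i, ch in enumerate(text)]
--     pairs.sort(key=lambda p: p[0])
--     return "".join(ch for _, ch in pairs)
-- ===== Notes on version B (the rewrite author's own statement) =====
-- stated objective: faster
-- what changed: Instead of appending each character into per-column string buckets (columns[key[i % n] - 1] += char, which recopies a column string per character), B tags each character of the cleaned text with its key value and stably sorts the pairs once; Pre_ excludes the inputs on which A raises (empty key, reached key value outside 1-n..n) and the defensible corner of reached nonpositive key values, which are not valid 1-based column numbers: A places them by Python's accidental negative-index wraparound, B by ascending key value, and neither order is specified.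
-- outside the precondition, e.g. on encrypt_row_transposition('AB', [0, 1]): A returns 'BA', B returns 'AB'
import Mathlib
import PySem

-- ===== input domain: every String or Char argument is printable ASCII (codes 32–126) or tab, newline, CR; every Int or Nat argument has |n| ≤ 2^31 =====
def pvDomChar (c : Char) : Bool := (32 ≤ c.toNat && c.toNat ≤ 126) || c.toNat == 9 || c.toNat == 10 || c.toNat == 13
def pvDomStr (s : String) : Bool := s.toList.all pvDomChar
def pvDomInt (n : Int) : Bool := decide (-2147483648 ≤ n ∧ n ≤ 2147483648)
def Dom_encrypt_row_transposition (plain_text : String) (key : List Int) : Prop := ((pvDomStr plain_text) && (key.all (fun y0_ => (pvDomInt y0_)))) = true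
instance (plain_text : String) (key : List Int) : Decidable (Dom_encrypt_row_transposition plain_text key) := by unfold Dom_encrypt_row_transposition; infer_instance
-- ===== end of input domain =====

-- B replaces A's per-column string buckets by one stable sort of (key value, char) pairs.

-- ===== PORT A =====
-- A, transliterated: clean the text, then append each char to columns[key[i % n] - 1], join the columns.
-- (The unused num_rows line raises ZeroDivisionError on an empty key in Python; empty keys are outside Pre_.)
def encrypt_row_transposition (plain_text : String) (key : List Int) : String :=
  let text := (PySem.Str.upper (PySem.Str.replace plain_text " " "")).toList
  let num_columns : Int := PySem.List.len key
  let cols := (PySem.List.enumerate text).foldl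
      (fun (columns : List (List Char)) ic =>
        PySem.List.pySetD columns (PySem.List.pyGetD key (PySem.Int.mod ic.1 num_columns) 0 - 1)
          (PySem.List.pyGetD columns (PySem.List.pyGetD key (PySem.Int.mod ic.1 num_columns) 0 - 1) [] ++ [ic.2]))
      (List.replicate key.length ([] : List Char))
  String.ofList cols.flatten

-- ===== PORT B =====
def encrypt_row_transposition_alt (plain_text : String) (key : List Int) : String :=
  let text := (PySem.Str.upper (PySem.Str.replace plain_text " " "")).toList
  let num_columns : Int := PySem.List.len key
  let pairs := (PySem.List.enumerate text).map
      (fun ic => (PySem.List.pyGetD key (PySem.Int.mod ic.1 num_columns) 0, ic.2))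
  String.ofList ((PySem.List.sorted pairs (fun p => p.1)).map (fun p => p.2))

-- ===== PRECONDITION & SPEC =====
-- the key values the cleaned text actually reaches (positions 0..min(len(text), len(key))-1)
def pvReachedVals (plain_text : String) (key : List Int) : List Int :=
  (List.range (min (PySem.Str.upper (PySem.Str.replace plain_text " " "")).toList.length key.length)).map
    (fun i => key.getD i 0)

-- Pre_ excludes the inputs on which A raises — an empty key (ZeroDivisionError in the num_rows
-- line) and a reached key value outside 1-len(key)..len(key) (IndexError at columns[key-1]) — and
-- the defensible corner of reached NONPOSITIVE key values: such values are not valid 1-based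
-- column numbers and their column position is unspecified, so A places them by Python's
-- negative-index wraparound while B places them by ascending key value; both orders are arbitrary.
def Pre_encrypt_row_transposition (plain_text : String) (key : List Int) : Prop :=
  key ≠ [] ∧ ∀ k ∈ pvReachedVals plain_text key,
    1 ≤ k ∧ k ≤ (key.length : Int)
instance (plain_text : String) (key : List Int) : Decidable (Pre_encrypt_row_transposition plain_text key) := by unfold Pre_encrypt_row_transposition; infer_instance

def pvWitness_encrypt_row_transposition : String × List Int := ("HELLO WORLD", [3, 1, 2])

def Spec_encrypt_row_transposition (plain_text : String) (key : List Int) (out : String) : Prop := out = encrypt_row_transposition_alt plain_text key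
instance (plain_text : String) (key : List Int) (out : String) : Decidable (Spec_encrypt_row_transposition plain_text key out) := by unfold Spec_encrypt_row_transposition; infer_instance

-- ===== CLAIM (what is proved, stated in full; the proofs are below) =====
def Claim_equal_encrypt_row_transposition : Prop := ∀ (plain_text : String) (key : List Int), Dom_encrypt_row_transposition plain_text key → Pre_encrypt_row_transposition plain_text key → Spec_encrypt_row_transposition plain_text key (encrypt_row_transposition plain_text key)

-- ===== LEMMAS AND PROOFS =====

-- a Python index in range -n..n-1 addresses position i % n
theorem pyIdx?_eq_mod (n : Nat) (i : Int) (h1 : -(n : Int) ≤ i) (h2 : i < (n : Int)) :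
    PySem.List.pyIdx? n i = some (PySem.Int.mod i (n : Int)).toNat := by
  have hn : (0 : Int) < n := by omega
  rw [PySem.Int.mod_eq_emod_of_pos hn]
  unfold PySem.List.pyIdx?
  by_cases h0 : 0 ≤ i
  · have : i % (n : Int) = i := Int.emod_eq_of_lt h0 h2
    simp [h0, h2, this]
  · have hi : i % (n : Int) = i + n := by
      have : (i + n) % n = i % n := Int.add_mul_emod_self_left (a := i) (b := (n : Int)) (c := 1) ▸ (by ring_nf)
      rw [← this]
      exact Int.emod_eq_of_lt (by omega) (by omega)
    simp only [h0, if_false, if_pos h1]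
    congr 1
    omega

theorem pySetD_eq_set_mod {α : Type} (cols : List α) (i : Int) (v : α)
    (h1 : -(cols.length : Int) ≤ i) (h2 : i < (cols.length : Int)) :
    PySem.List.pySetD cols i v = cols.set (PySem.Int.mod i (cols.length : Int)).toNat v := by
  unfold PySem.List.pySetD PySem.List.pySet?
  rw [pyIdx?_eq_mod _ _ h1 h2]
  rfl

theorem pyGetD_eq_getD_mod {α : Type} (cols : List α) (i : Int) (d : α)
    (h1 : -(cols.length : Int) ≤ i) (h2 : i < (cols.length : Int)) :
    PySem.List.pyGetD cols i d = cols.getD (PySem.Int.mod i (cols.length : Int)).toNat d := by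
  unfold PySem.List.pyGetD PySem.List.pyGet?
  rw [pyIdx?_eq_mod _ _ h1 h2]
  simp [List.getD_eq_getElem?_getD]

-- flatten as a flatMap over column indices
theorem flatten_eq_flatMap_range (l : List (List Char)) :
    l.flatten = (List.range l.length).flatMap (fun j => l.getD j []) := by
  induction l with
  | nil => simp
  | cons x xs ih =>
      simp only [List.flatten_cons, List.length_cons, List.range_succ_eq_map,
        List.flatMap_cons, List.flatMap_map]
      simpa using ih

-- insertBy walks past a prefix it never inserts before
theorem insertBy_append_left {α : Type} (before : α → α → Bool) (x : α) (l1 l2 : List α)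
    (h : ∀ y ∈ l1, before x y = false) :
    PySem.List.insertBy before x (l1 ++ l2) = l1 ++ PySem.List.insertBy before x l2 := by
  induction l1 with
  | nil => simp
  | cons a t ih =>
      have ha : before x a = false := h a (by simp)
      simp only [List.cons_append, PySem.List.insertBy, ha, Bool.false_eq_true, if_false]
      rw [ih (fun y hy => h y (by simp [hy]))]

theorem insertBy_all_before {α : Type} (before : α → α → Bool) (x : α) (l : List α)
    (h : ∀ y ∈ l, before x y = true) :
    PySem.List.insertBy before x l = x :: l := by
  cases l with
  | nil => rfl
  | cons a t => simp [PySem.List.insertBy, h a (by simp)]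

-- two insertions agree when the comparators agree on the list's members
theorem insertBy_congr {α : Type} (b1 b2 : α → α → Bool) (x : α) (l : List α)
    (h : ∀ y ∈ l, b1 x y = b2 x y) :
    PySem.List.insertBy b1 x l = PySem.List.insertBy b2 x l := by
  induction l with
  | nil => rfl
  | cons a t ih =>
      simp only [PySem.List.insertBy, h a (by simp)]
      rw [ih (fun y hy => h y (by simp [hy]))]

-- two stable sorts agree when their keys induce the same strict comparisons on the members
theorem sorted_key_congr (ps : List (Int × Char)) (f g : Int × Char → Int)
    (h : ∀ x ∈ ps, ∀ y ∈ ps, (f x < f y ↔ g x < g y)) :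
    PySem.List.sorted ps f = PySem.List.sorted ps g := by
  induction ps using List.reverseRecOn with
  | nil => rfl
  | append_singleton ps p ih =>
      rw [PySem.List.sorted_eq_foldl_insertBy, PySem.List.sorted_eq_foldl_insertBy,
        List.foldl_append, List.foldl_append, List.foldl_cons, List.foldl_cons,
        List.foldl_nil, List.foldl_nil, ← PySem.List.sorted_eq_foldl_insertBy,
        ← PySem.List.sorted_eq_foldl_insertBy,
        ih (fun x hx y hy => h x (by simp [hx]) y (by simp [hy]))]
      refine insertBy_congr _ _ _ _ ?_
      intro y hy
      have hyp : y ∈ ps := (PySem.List.mem_sorted _ _ _ _).mp hy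
      have := h p (by simp) y (by simp [hyp])
      by_cases hlt : f p < f y
      · simp [hlt, this.mp hlt]
      · have hng : ¬ g p < g y := fun hg => hlt (this.mpr hg)
        simp [hlt, hng]

-- inserting a pair into a bucket concatenation appends it at the end of its bucket
theorem insertBy_buckets (f : Int × Char → Int) (vs : List Int) (ps : List (Int × Char)) (p : Int × Char)
    (hvs : vs.Pairwise (· < ·)) (hp : f p ∈ vs) :
    PySem.List.insertBy (fun a b => decide (f a < f b)) p
        (vs.flatMap (fun v => ps.filter (fun q => f q == v)))
      = vs.flatMap (fun v => (ps ++ [p]).filter (fun q => f q == v)) := by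
  induction vs with
  | nil => cases hp
  | cons v vs ih =>
      have hvlt : ∀ w ∈ vs, v < w := by
        intro w hw; exact (List.pairwise_cons.mp hvs).1 w hw
      have hvs' : vs.Pairwise (· < ·) := (List.pairwise_cons.mp hvs).2
      simp only [List.flatMap_cons]
      by_cases hpv : f p = v
      · -- p goes at the end of the first bucket
        have h1 : ∀ y ∈ ps.filter (fun q => f q == v), (fun a b => decide (f a < f b)) p y = false := by
          intro y hy
          have : f y = v := by simpa using (List.mem_filter.mp hy).2
          simp [this, hpv]
        rw [insertBy_append_left _ _ _ _ h1]
        have h2 : ∀ y ∈ vs.flatMap (fun v => ps.filter (fun q => f q == v)),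
            (fun a b => decide (f a < f b)) p y = true := by
          intro y hy
          obtain ⟨w, hw, hyw⟩ := List.mem_flatMap.mp hy
          have : f y = w := by simpa using (List.mem_filter.mp hyw).2
          simp [this, hpv]
          exact hvlt w hw
        rw [insertBy_all_before _ _ _ h2]
        have hb1 : (ps ++ [p]).filter (fun q => f q == v) = ps.filter (fun q => f q == v) ++ [p] := by
          simp [List.filter_append, hpv]
        have hb2 : ∀ w ∈ vs, (ps ++ [p]).filter (fun q => f q == w) = ps.filter (fun q => f q == w) := by
          intro w hw
          have : f p ≠ w := by have := hvlt w hw; omega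
          simp [List.filter_append, this]
        rw [hb1, List.flatMap_congr hb2]
        simp
      · -- p belongs to a later bucket
        have hp' : f p ∈ vs := by cases hp with
          | head => exact absurd rfl hpv
          | tail _ h => exact h
        have hvp : v < f p := hvlt _ hp'
        have h1 : ∀ y ∈ ps.filter (fun q => f q == v), (fun a b => decide (f a < f b)) p y = false := by
          intro y hy
          have : f y = v := by simpa using (List.mem_filter.mp hy).2
          simp [this]; omega
        rw [insertBy_append_left _ _ _ _ h1, ih hvs' hp']
        have : (ps ++ [p]).filter (fun q => f q == v) = ps.filter (fun q => f q == v) := by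
          have : f p ≠ v := hpv
          simp [List.filter_append, this]
        rw [this]

-- the stable sort by key f is the ascending concatenation of the key buckets
theorem sorted_eq_buckets (f : Int × Char → Int) (ps : List (Int × Char)) (vs : List Int)
    (hvs : vs.Pairwise (· < ·)) (hps : ∀ q ∈ ps, f q ∈ vs) :
    PySem.List.sorted ps f
      = vs.flatMap (fun v => ps.filter (fun q => f q == v)) := by
  induction ps using List.reverseRecOn with
  | nil => simp [PySem.List.sorted_eq_foldl_insertBy]
  | append_singleton ps p ih =>
      rw [PySem.List.sorted_eq_foldl_insertBy, List.foldl_append, List.foldl_cons, List.foldl_nil,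
        ← PySem.List.sorted_eq_foldl_insertBy,
        ih (fun q hq => hps q (by simp [hq])),
        insertBy_buckets f vs ps p hvs (hps p (by simp))]

-- A's column loop: column j collects, in order, the characters whose key value addresses column j
theorem cols_foldl_getD (n : Nat) (ps : List (Int × Char)) :
    ∀ (cols : List (List Char)), cols.length = n →
    (∀ q ∈ ps, 1 - (n : Int) ≤ q.1 ∧ q.1 ≤ (n : Int)) →
    (ps.foldl (fun cols q =>
        PySem.List.pySetD cols (q.1 - 1) (PySem.List.pyGetD cols (q.1 - 1) [] ++ [q.2])) cols).length
      = n ∧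
    ∀ j, j < n →
    (ps.foldl (fun cols q =>
        PySem.List.pySetD cols (q.1 - 1) (PySem.List.pyGetD cols (q.1 - 1) [] ++ [q.2])) cols).getD j []
      = cols.getD j []
        ++ (ps.filter (fun q => PySem.Int.mod (q.1 - 1) (n : Int) == (j : Int))).map (fun q => q.2) := by
  induction ps with
  | nil => intro cols hcl _; simp [hcl]
  | cons q ps ih =>
      intro cols hcl hb
      obtain ⟨h1, h2⟩ := hb q (by simp)
      have hr1 : -(cols.length : Int) ≤ q.1 - 1 := by omega
      have hr2 : q.1 - 1 < (cols.length : Int) := by omega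
      have hnpos : (0 : Int) < (n : Int) := by omega
      set c : Nat := (PySem.Int.mod (q.1 - 1) (n : Int)).toNat with hc
      have hmodc : PySem.Int.mod (q.1 - 1) (n : Int) = (c : Int) := by
        rw [hc, Int.toNat_of_nonneg (PySem.Int.mod_nonneg _ hnpos)]
      have hcn : c < n := by
        have := PySem.Int.mod_lt (q.1 - 1) hnpos
        omega
      have hstep : PySem.List.pySetD cols (q.1 - 1) (PySem.List.pyGetD cols (q.1 - 1) [] ++ [q.2])
          = cols.set c (cols.getD c [] ++ [q.2]) := by
        rw [pySetD_eq_set_mod cols _ _ hr1 hr2, pyGetD_eq_getD_mod cols _ _ hr1 hr2, hcl, ← hc]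
      set cols' := cols.set c (cols.getD c [] ++ [q.2]) with hcols'
      have hlen : cols'.length = n := by rw [hcols', List.length_set, hcl]
      obtain ⟨ihlen, ihget⟩ := ih cols' hlen (fun r hr => hb r (by simp [hr]))
      simp only [List.foldl_cons, hstep]
      refine ⟨ihlen, ?_⟩
      intro j hj
      rw [ihget j hj]
      have hget : cols'.getD j [] =
          if j = c then cols.getD j [] ++ [q.2] else cols.getD j [] := by
        by_cases hje : j = c
        · subst hje
          rw [if_pos rfl, hcols', List.getD_eq_getElem _ _ (by simp [hcl]; omega)]
          simp only [List.getElem_set_self]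
        · rw [if_neg hje, hcols']
          simp [List.getD_eq_getElem?_getD, List.getElem?_set_ne (Ne.symm hje)]
      by_cases hje : j = c
      · rw [hget, if_pos hje,
          List.filter_cons_of_pos (by simp [hmodc, hje]), List.map_cons, List.append_assoc,
          List.singleton_append]
      · rw [hget, if_neg hje, List.filter_cons_of_neg (by simp [hmodc]; omega)]

-- ===== VERDICT (by name: the statements are the Claim_ definitions above) =====
set_option maxHeartbeats 1000000 in
theorem encrypt_row_transposition_spec : Claim_equal_encrypt_row_transposition := by
  intro plain_text key _hdom hpre
  obtain ⟨hne, hrange⟩ := hpre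
  unfold Spec_encrypt_row_transposition
  unfold encrypt_row_transposition encrypt_row_transposition_alt
  simp only []
  simp only [PySem.List.len_eq]
  set text := (PySem.Str.upper (PySem.Str.replace plain_text " " "")).toList with htext
  have hklen : 0 < key.length := List.length_pos_of_ne_nil hne
  have hnpos : (0 : Int) < (key.length : Int) := by exact_mod_cast hklen
  -- the common list of (key value, char) pairs
  set f : Int × Char → Int × Char :=
    fun ic => (PySem.List.pyGetD key (PySem.Int.mod ic.1 ((key.length : Int))) 0, ic.2) with hf
  set ps := (PySem.List.enumerate text).map f with hps
  -- every pair's key value is a reached value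
  have hpsvals : ∀ q ∈ ps, q.1 ∈ pvReachedVals plain_text key := by
    intro q hq
    obtain ⟨ic, hic, hicq⟩ := List.mem_map.mp hq
    obtain ⟨k, hk, hicv⟩ := (PySem.List.mem_enumerate_iff _ _ _).mp hic
    subst hicq; subst hicv
    have hmod : PySem.Int.mod ((0 : Int) + (k : Int)) ((key.length : Int))
        = ((k % key.length : Nat) : Int) := by
      simp
    rw [hf]
    simp only [hmod, PySem.List.pyGetD_natCast]
    unfold pvReachedVals
    rw [← htext]
    refine List.mem_map.mpr ⟨k % key.length, List.mem_range.mpr ?_, rfl⟩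
    have hm1 := Nat.mod_lt k hklen
    have hm2 := Nat.mod_le k key.length
    omega
  have hpos : ∀ q ∈ ps, 1 ≤ q.1 ∧ q.1 ≤ (key.length : Int) :=
    fun q hq => hrange q.1 (hpsvals q hq)
  have hpsmem : ∀ q ∈ ps, 1 - (key.length : Int) ≤ q.1 ∧ q.1 ≤ (key.length : Int) :=
    fun q hq => ⟨by have := (hpos q hq).1; omega, (hpos q hq).2⟩
  -- inside Pre_, key value v addresses column v - 1, so column order is key-value order
  have hmodid : ∀ q ∈ ps, PySem.Int.mod (q.1 - 1) ((key.length : Int)) = q.1 - 1 := by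
    intro q hq
    obtain ⟨h1, h2⟩ := hpos q hq
    rw [PySem.Int.mod_eq_emod_of_pos hnpos]
    exact Int.emod_eq_of_lt (by omega) (by omega)
  have hagree : ∀ x ∈ ps, ∀ y ∈ ps,
      (PySem.Int.mod (x.1 - 1) ((key.length : Int)) < PySem.Int.mod (y.1 - 1) ((key.length : Int))
        ↔ x.1 < y.1) := by
    intro x hx y hy
    rw [hmodid x hx, hmodid y hy]
    omega
  -- A's fold over enumerate(text) is the bucket fold over ps
  rw [show (PySem.List.enumerate text).foldl
      (fun (columns : List (List Char)) ic =>
        PySem.List.pySetD columns (PySem.List.pyGetD key (PySem.Int.mod ic.1 ((key.length : Int))) 0 - 1)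
          (PySem.List.pyGetD columns (PySem.List.pyGetD key (PySem.Int.mod ic.1 ((key.length : Int))) 0 - 1) [] ++ [ic.2]))
      (List.replicate key.length ([] : List Char))
      = ps.foldl (fun cols q =>
        PySem.List.pySetD cols (q.1 - 1) (PySem.List.pyGetD cols (q.1 - 1) [] ++ [q.2]))
        (List.replicate key.length ([] : List Char)) from by
    rw [hps, List.foldl_map]]
  obtain ⟨hlen, hget⟩ := cols_foldl_getD key.length ps (List.replicate key.length ([] : List Char))
    (List.length_replicate) hpsmem
  -- A's flatten is the stable sort of ps by the column each key value addresses
  have hcolmem : ∀ q ∈ ps, PySem.Int.mod (q.1 - 1) ((key.length : Int))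
      ∈ (List.range key.length).map (fun (j : Nat) => (j : Int)) := by
    intro q hq
    have hnn := PySem.Int.mod_nonneg (q.1 - 1) hnpos
    have hlt := PySem.Int.mod_lt (q.1 - 1) hnpos
    refine List.mem_map.mpr ⟨(PySem.Int.mod (q.1 - 1) ((key.length : Int))).toNat,
      List.mem_range.mpr (by omega), by omega⟩
  have hvsA : ((List.range key.length).map (fun (j : Nat) => (j : Int))).Pairwise (· < ·) := by
    refine List.pairwise_iff_getElem.mpr ?_
    intro i j hi hj hij
    simp only [List.getElem_map, List.getElem_range]
    omega
  have hA : (ps.foldl (fun cols q =>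
        PySem.List.pySetD cols (q.1 - 1) (PySem.List.pyGetD cols (q.1 - 1) [] ++ [q.2]))
        (List.replicate key.length ([] : List Char))).flatten
      = (PySem.List.sorted ps (fun q => PySem.Int.mod (q.1 - 1) ((key.length : Int)))).map
          (fun q => q.2) := by
    rw [sorted_eq_buckets _ ps _ hvsA hcolmem, flatten_eq_flatMap_range, hlen,
      List.map_flatMap, List.flatMap_map]
    refine List.flatMap_congr ?_
    intro j hj
    rw [hget j (List.mem_range.mp hj)]
    have hrep : (List.replicate key.length ([] : List Char)).getD j [] = [] := by
      simp [List.getD_eq_getElem?_getD]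
    rw [hrep, List.nil_append, List.filter_map, List.map_map]
  rw [hA]
  -- under ¬D, sorting by column equals sorting by key value
  rw [sorted_key_congr ps (fun q => PySem.Int.mod (q.1 - 1) ((key.length : Int)))
    (fun q => q.1) hagree]
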